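-- pv_equiv track=rewrite | github.com/OlinaKundu/Email-triage-assistant | comp/ai_processor.py | _fallback_actions
-- ===== SOURCE A (Python) =====
-- from typing import Dict, List, Optional
--
-- def _fallback_actions(email_text: str) -> List[Dict]:
--     """Fallback action detection using keywords."""
--     action_keywords = [
--         'please', 'could you', 'can you', 'need to', 'should',
--         'must', 'required', 'action', 'todo', 'task'
--     ]
--
--     actions = []
--     for line in email_text.split('\n'):
--         line = line.strip()
--         if any(keyword in line.lower() for keyword in action_keywords):
--             actions.append({
--                 'text': line,
--                 'assignee': 'unspecified',
--                 'deadline': 'none',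
--                 'confidence': 'low'
--             })
--
--     return actions[:5]  # Limit to 5 actions
-- ===== SOURCE B (Python) =====
-- from typing import Dict, List
--
--
-- def _fallback_actions(email_text: str) -> List[Dict]:
--     """Fallback action detection using a keyword trie (multi-pattern substring search)."""
--     keywords = [
--         'please', 'could you', 'can you', 'need to', 'should',
--         'must', 'required', 'action', 'todo', 'task'
--     ]
--
--     # Compile the keyword list into a character trie once; '' marks a terminal node.
--     root = {}
--     for kw in keywords:
--         node = root
--         for ch in kw:
--             node = node.setdefault(ch, {})
--         node[''] = True
--
--     def has_keyword(s: str) -> bool: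
--         for i in range(len(s)):
--             node = root
--             for ch in s[i:]:
--                 if ch not in node:
--                     break
--                 node = node[ch]
--                 if '' in node:
--                     return True
--         return False
--
--     matched = [line for line in map(str.strip, email_text.split('\n'))
--                if has_keyword(line.lower())][:5]
--     return [{'text': line, 'assignee': 'unspecified', 'deadline': 'none',
--              'confidence': 'low'} for line in matched]
-- ===== Notes on version B (the rewrite author's own statement) =====
-- stated objective: alternative
-- what changed: B compiles the keyword list into a character trie built once and tests each lowered line with a single left-to-right trie walk per start position (one shared multi-pattern matcher), instead of A's per-line loop running a separate substring scan for every keyword; B also stages the result as strip-map / trie-filter / take-5 / dict-build comprehensions instead of A's single accumulating loop plus slice.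
import Mathlib
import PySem

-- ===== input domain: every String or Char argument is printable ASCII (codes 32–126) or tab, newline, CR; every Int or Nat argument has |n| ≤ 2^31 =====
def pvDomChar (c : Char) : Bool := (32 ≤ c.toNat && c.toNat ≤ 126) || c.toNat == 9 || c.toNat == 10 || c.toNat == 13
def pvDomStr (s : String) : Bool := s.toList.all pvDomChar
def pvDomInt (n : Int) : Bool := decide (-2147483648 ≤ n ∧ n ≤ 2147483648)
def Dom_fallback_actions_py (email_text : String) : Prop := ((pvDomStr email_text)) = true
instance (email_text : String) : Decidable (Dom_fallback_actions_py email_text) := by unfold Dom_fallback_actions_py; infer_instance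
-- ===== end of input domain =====

-- B compiles the keywords into a character trie built once and tests each lowered line with
-- one trie walk per start position instead of A's per-keyword substring scans, staging the
-- result as map/filter/take/map passes (objective: alternative; same output).

-- ===== PORT A =====
def pvKeywords : List String :=
  ["please", "could you", "can you", "need to", "should",
   "must", "required", "action", "todo", "task"]

def pvEntry (line : String) : List (String × String) :=
  [("text", line), ("assignee", "unspecified"), ("deadline", "none"), ("confidence", "low")]

def fallback_actions_py (email_text : String) : List (List (String × String)) :=
  let actions := ((PySem.Str.split? email_text "\n").getD []).foldl
    (fun acc l =>
      let line := PySem.Str.strip l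
      if pvKeywords.any (fun keyword => PySem.Str.isIn keyword (PySem.Str.lower line)) then
        acc ++ [pvEntry line]
      else acc) []
  PySem.List.slice actions none (some 5)

-- ===== PORT B =====
-- the trie: a node is (terminal flag, children); explicit child-list type (no nested inductive)
mutual
inductive PvTrie where
  | node : Bool → PvKids → PvTrie
inductive PvKids where
  | nil : PvKids
  | cons : Char → PvTrie → PvKids → PvKids
end

def pvKidsGet : PvKids → Char → Option PvTrie
  | .nil, _ => none
  | .cons c t rest, d => if c = d then some t else pvKidsGet rest d

def pvKidsSet : PvKids → Char → PvTrie → PvKids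
  | .nil, d, u => .cons d u .nil
  | .cons c t rest, d, u => if c = d then .cons c u rest else .cons c t (pvKidsSet rest d u)

-- 'node = node.setdefault(ch, {})' down the keyword, then "node[''] = True" → terminal flag
def pvInsert : PvTrie → List Char → PvTrie
  | .node _ ks, [] => .node true ks
  | .node b ks, c :: rest =>
      let child := (pvKidsGet ks c).getD (.node false .nil)
      .node b (pvKidsSet ks c (pvInsert child rest))

def pvRoot : PvTrie := pvKeywords.foldl (fun t k => pvInsert t k.toList) (.node false .nil)

def pvTerm : PvTrie → Bool
  | .node b _ => b

-- the inner 'for ch in s[i:]' walk from the root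
def pvWalk : PvTrie → List Char → Bool
  | _, [] => false
  | .node _ ks, c :: rest =>
    match pvKidsGet ks c with
    | none => false
    | some t' => pvTerm t' || pvWalk t' rest

-- 'for i in range(len(s))': one walk per start position
def pvScan (root : PvTrie) : List Char → Bool
  | [] => false
  | c :: rest => pvWalk root (c :: rest) || pvScan root rest

def fallback_actions_py_alt (email_text : String) : List (List (String × String)) :=
  let matched := ((((PySem.Str.split? email_text "\n").getD []).map PySem.Str.strip).filter
      (fun line => pvScan pvRoot (PySem.Str.lower line).toList)).take 5
  matched.map pvEntry

-- ===== PRECONDITION & SPEC =====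
def Spec_fallback_actions_py (email_text : String) (out : List (List (String × String))) : Prop := out = fallback_actions_py_alt email_text
instance (email_text : String) (out : List (List (String × String))) : Decidable (Spec_fallback_actions_py email_text out) := by unfold Spec_fallback_actions_py; infer_instance

-- ===== CLAIM =====
def Claim_equal_fallback_actions_py : Prop := ∀ (email_text : String), Dom_fallback_actions_py email_text → Spec_fallback_actions_py email_text (fallback_actions_py email_text)

-- ===== LEMMAS AND PROOFS =====

-- membership semantics of the trie: the path p ends at a terminal node
def pvMem : PvTrie → List Char → Bool
  | .node b _, [] => b
  | .node _ ks, c :: rest =>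
    match pvKidsGet ks c with
    | none => false
    | some t' => pvMem t' rest

theorem pvKidsGet_set : ∀ (ks : PvKids) (c d : Char) (u : PvTrie),
    pvKidsGet (pvKidsSet ks c u) d = if c = d then some u else pvKidsGet ks d
  | .nil, c, d, u => by simp [pvKidsSet, pvKidsGet]
  | .cons c' t rest, c, d, u => by
    simp only [pvKidsSet]
    by_cases h1 : c' = c <;> by_cases h2 : c' = d <;> by_cases h3 : c = d <;>
      simp_all [pvKidsGet, pvKidsGet_set rest c d u, pvKidsGet_set rest d d u]

theorem pvMem_empty (p : List Char) : pvMem (.node false .nil) p = false := by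
  cases p <;> simp [pvMem, pvKidsGet]

theorem pvMem_insert (ks : List Char) (t : PvTrie) (p : List Char) :
    pvMem (pvInsert t ks) p = (decide (p = ks) || pvMem t p) := by
  induction ks generalizing t p with
  | nil =>
    obtain ⟨b, kids⟩ := t
    cases p with
    | nil => simp [pvInsert, pvMem]
    | cons c q => simp [pvInsert, pvMem]
  | cons c rest ih =>
    obtain ⟨b, kids⟩ := t
    cases p with
    | nil => simp [pvInsert, pvMem]
    | cons d q =>
      simp only [pvInsert, pvMem, pvKidsGet_set]
      by_cases hcd : c = d
      · subst hcd
        rw [if_pos rfl]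
        cases hg : pvKidsGet kids c with
        | none => simp [ih, pvMem_empty]
        | some t0 => simp [ih]
      · rw [if_neg hcd]
        have : decide (d :: q = c :: rest) = false := by
          simp; intro h; exact absurd h.symm hcd
        rw [this, Bool.false_or]

theorem pvWalk_iff (t : PvTrie) (s : List Char) :
    pvWalk t s = true ↔ ∃ p, p ≠ [] ∧ p <+: s ∧ pvMem t p = true := by
  induction s generalizing t with
  | nil =>
    simp only [pvWalk]
    constructor
    · intro h; exact absurd h (by simp)
    · rintro ⟨p, hne, hp, _⟩
      exact absurd (List.prefix_nil.mp hp) hne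
  | cons c rest ih =>
    obtain ⟨b, kids⟩ := t
    simp only [pvWalk]
    cases hg : pvKidsGet kids c with
    | none =>
      simp only [Bool.false_eq_true, false_iff]
      rintro ⟨p, hne, hp, hm⟩
      cases p with
      | nil => exact hne rfl
      | cons d q =>
        obtain ⟨hd, -⟩ := List.cons_prefix_cons.mp hp
        subst hd
        simp [pvMem, hg] at hm
    | some t' =>
      rw [Bool.or_eq_true, ih]
      constructor
      · rintro (hterm | ⟨q, hqne, hq, hm⟩)
        · exact ⟨[c], by simp, by simp, by obtain ⟨b', k'⟩ := t'; simpa [pvMem, hg, pvTerm] using hterm⟩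
        · exact ⟨c :: q, by simp, by simpa using hq, by simpa [pvMem, hg] using hm⟩
      · rintro ⟨p, hne, hp, hm⟩
        cases p with
        | nil => exact absurd rfl hne
        | cons d q =>
          obtain ⟨hd, hq⟩ := List.cons_prefix_cons.mp hp
          subst hd
          simp only [pvMem, hg] at hm
          cases q with
          | nil => left; obtain ⟨b', k'⟩ := t'; simpa [pvMem, pvTerm] using hm
          | cons e r => right; exact ⟨e :: r, by simp, hq, hm⟩

theorem pvScan_iff (t : PvTrie) (s : List Char) :
    pvScan t s = true ↔ ∃ p, p ≠ [] ∧ p <:+: s ∧ pvMem t p = true := by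
  induction s with
  | nil =>
    simp only [pvScan]
    constructor
    · intro h; exact absurd h (by simp)
    · rintro ⟨p, hne, hp, _⟩
      exact absurd (List.infix_nil.mp hp) hne
  | cons c rest ih =>
    simp only [pvScan, Bool.or_eq_true, ih, pvWalk_iff]
    constructor
    · rintro (⟨p, hne, hp, hm⟩ | ⟨p, hne, hp, hm⟩)
      · exact ⟨p, hne, hp.isInfix, hm⟩
      · exact ⟨p, hne, hp.trans (List.suffix_cons c rest).isInfix, hm⟩
    · rintro ⟨p, hne, hp, hm⟩
      rw [List.infix_cons_iff] at hp
      rcases hp with hpre | hinf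
      · exact Or.inl ⟨p, hne, hpre, hm⟩
      · exact Or.inr ⟨p, hne, hinf, hm⟩

theorem pvMem_foldl (kws : List String) (t : PvTrie) (p : List Char) :
    pvMem (kws.foldl (fun t k => pvInsert t k.toList) t) p =
      (kws.any (fun k => decide (p = k.toList)) || pvMem t p) := by
  induction kws generalizing t with
  | nil => simp
  | cons k rest ih =>
    simp only [List.foldl_cons, ih, pvMem_insert, List.any_cons, Bool.or_assoc,
      Bool.or_comm]

theorem pvMem_root (p : List Char) :
    pvMem pvRoot p = pvKeywords.any (fun k => decide (p = k.toList)) := by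
  rw [pvRoot, pvMem_foldl, pvMem_empty, Bool.or_false]

-- the two per-line tests agree (all keywords nonempty)
theorem pvScan_eq_any (s : List Char) :
    pvScan pvRoot s = pvKeywords.any (fun k => PySem.Chars.isIn k.toList s) := by
  rw [Bool.eq_iff_iff, pvScan_iff]
  simp only [List.any_eq_true, PySem.Chars.isIn_iff_infix]
  constructor
  · rintro ⟨p, hne, hp, hm⟩
    rw [pvMem_root] at hm
    simp only [List.any_eq_true, decide_eq_true_eq] at hm
    obtain ⟨k, hk, rfl⟩ := hm
    exact ⟨k, hk, hp⟩
  · rintro ⟨k, hk, hinf⟩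
    refine ⟨k.toList, ?_, hinf, ?_⟩
    · fin_cases hk <;> decide
    · rw [pvMem_root]
      simp only [List.any_eq_true, decide_eq_true_eq]
      exact ⟨k, hk, rfl⟩

-- A's accumulating loop + slice, as filter/map/take
theorem pvA_eq (email_text : String) :
    fallback_actions_py email_text =
      (((((PySem.Str.split? email_text "\n").getD []).filter
        (fun l => pvKeywords.any (fun keyword => PySem.Str.isIn keyword (PySem.Str.lower (PySem.Str.strip l))))).map
        (fun l => pvEntry (PySem.Str.strip l))).take 5) := by
  simp only [fallback_actions_py]
  rw [PySem.List.slice_to _ (by norm_num)]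
  rw [PySem.List.foldl_append_if
    (fun l => pvKeywords.any (fun keyword => PySem.Str.isIn keyword (PySem.Str.lower (PySem.Str.strip l))))
    (fun l => pvEntry (PySem.Str.strip l))]
  simp

-- B's staged passes, brought to the same form
theorem pvB_eq (email_text : String) :
    fallback_actions_py_alt email_text =
      (((((PySem.Str.split? email_text "\n").getD []).filter
        (fun l => pvKeywords.any (fun keyword => PySem.Str.isIn keyword (PySem.Str.lower (PySem.Str.strip l))))).map
        (fun l => pvEntry (PySem.Str.strip l))).take 5) := by
  simp only [fallback_actions_py_alt]
  rw [List.filter_map]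
  have hp : ∀ (l : String), ((fun line => pvScan pvRoot (PySem.Str.lower line).toList) ∘ PySem.Str.strip) l
      = (pvKeywords.any fun keyword => PySem.Str.isIn keyword (PySem.Str.lower (PySem.Str.strip l))) := by
    intro l; simp [pvScan_eq_any]
  rw [List.filter_congr (fun l _ => hp l)]
  simp [List.map_take, List.map_map, Function.comp_def]

-- ===== VERDICT =====
theorem fallback_actions_py_spec : Claim_equal_fallback_actions_py := by
  intro email_text _
  simp only [Spec_fallback_actions_py]
  rw [pvA_eq, pvB_eq]
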